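-- pv_equiv track=rewrite | github.com/zhenyu/interviewPractice | python/hrt_first_colum.py | fill_part
-- ===== SOURCE A (Python) =====
-- from typing import List, Tuple
--
-- def fill_part(part:List[List[int]], left_mosts: List[int])->Tuple[int, int]:
--
--
--     r_max = 0
--     base_max = 0
--     #max
--     for row_index in range(len(part)):
--         row = part[row_index]
--         base_max = max(base_max, left_mosts[row_index])
--         sum =0
--         for c in range (base_max):
--             sum+=(1-row[c])
--         r_max+=sum
--
--     # min
--     base_min = len(part[0])+1
--     r_min  = 0
--     row_index =0
--     for row_index in range (len(part)):
--         if left_mosts[row_index]!=0 and left_mosts[row_index]<base_min: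
--             base_min = left_mosts[row_index]
--             break
--     if base_min<len(part[0])+1:
--         pre_row = None
--         while row_index < len(part):
--             row = part[row_index]
--             if pre_row is not None:
--                 for c in range(base_min):
--                     if row[c]==0 and pre_row[c]==1:
--                         row[c]=1
--             sum =0
--             for c in range (base_min):
--                 sum += (1-row[c])
--             r_min+=sum
--             row_index+=1
--
--     return (r_min, r_max)
-- ===== SOURCE B (Python) =====
-- from typing import List, Tuple
--
-- def fill_part(part: List[List[int]], left_mosts: List[int]) -> Tuple[int, int]:
--     # r_max: running prefix maximum of left_mosts; each row contributes the
--     # closed form bm - sum(row[:bm]) instead of an inner element loop.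
--     r_max = 0
--     bm = 0
--     for row, lm in zip(part, left_mosts):
--         bm = max(bm, lm)
--         r_max += bm - sum(row[:bm])
--
--     # r_min: find the first row with a usable nonzero left_most, then sum
--     # COLUMN-MAJOR: each of the first base_min columns contributes
--     # (number of rows from start) minus the column's sum.
--     width = len(part[0])
--     start = None
--     base_min = 0
--     for i in range(len(part)):
--         v = left_mosts[i]
--         if v != 0 and v <= width:
--             start, base_min = i, v
--             break
--     r_min = 0
--     if start is not None:
--         for c in range(base_min):
--             col = [row[c] for row in part[start:]]
--             r_min += len(col) - sum(col)
--     return (r_min, r_max)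
-- ===== Notes on version B (the rewrite author's own statement) =====
-- stated objective: alternative
-- what changed: r_max is accumulated over zip(part, left_mosts) with the per-row closed form base_max - sum(row[:base_max]) instead of an inner element loop, and r_min is summed column-major (length-minus-sum of each of the first base_min columns over part[start:]) instead of A's row-major while loop with index bookkeeping and its dead pre_row propagation branch.
import Mathlib
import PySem

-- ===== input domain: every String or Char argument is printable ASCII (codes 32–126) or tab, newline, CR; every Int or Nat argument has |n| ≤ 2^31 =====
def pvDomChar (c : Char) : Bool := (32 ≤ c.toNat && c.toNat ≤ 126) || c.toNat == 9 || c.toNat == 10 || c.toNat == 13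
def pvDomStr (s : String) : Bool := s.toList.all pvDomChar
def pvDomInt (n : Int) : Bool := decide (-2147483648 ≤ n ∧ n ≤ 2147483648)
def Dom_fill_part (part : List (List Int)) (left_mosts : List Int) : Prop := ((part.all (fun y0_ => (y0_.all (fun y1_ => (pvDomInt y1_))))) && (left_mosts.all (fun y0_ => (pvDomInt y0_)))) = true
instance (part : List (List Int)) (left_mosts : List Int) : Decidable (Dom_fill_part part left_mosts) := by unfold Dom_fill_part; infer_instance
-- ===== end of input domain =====

-- B replaces A's inner element loops by a per-row closed form for r_max and a column-major
-- sum for r_min (objective: alternative). Note: A's `pre_row` is never reassigned in the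
-- Python, so its propagation branch is dead code and neither program mutates `part`.

-- ===== PORT A =====
-- the inner 'for c in range(bound): sum += 1 - row[c]' loop of A (used twice)
def fillA_rowSum (row : List Int) (bound : Int) : Int :=
  (PySem.List.pyRange 0 bound 1).foldl (fun s c => s + (1 - PySem.List.pyGetD row c 0)) 0

-- A's 'for c in range(base_min): if row[c]==0 and pre_row[c]==1: row[c]=1' loop
-- (dead code in A: pre_row is always None; ported for faithfulness)
def fillA_mutate (pre row : List Int) (bound : Int) : List Int :=
  (PySem.List.pyRange 0 bound 1).foldl
    (fun r c => if PySem.List.pyGetD r c 0 == 0 && PySem.List.pyGetD pre c 0 == 1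
                then PySem.List.pySetD r c 1 else r) row

def fill_part (part : List (List Int)) (left_mosts : List Int) : Int × Int :=
  let n := part.length
  -- for row_index in range(len(part)): base_max = max(base_max, lm); sum; r_max += sum
  let stMax := (List.range n).foldl (fun (st : Int × Int) i =>
      (st.1 + fillA_rowSum (part.getD i []) (max st.2 (left_mosts.getD i 0)),
       max st.2 (left_mosts.getD i 0))) (0, 0)
  let r_max := stMax.1
  let width : Int := ((part.getD 0 []).length : Int)   -- len(part[0]); Pre_ excludes part = []
  -- for row_index in range(len(part)): if lm != 0 and lm < base_min: base_min = lm; break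
  let found := (List.range n).foldl (fun (acc : Option (Nat × Int)) i =>
      match acc with
      | some r => some r
      | none =>
        if left_mosts.getD i 0 ≠ 0 ∧ left_mosts.getD i 0 < width + 1
        then some (i, left_mosts.getD i 0) else none) none
  match found with
  | none =>
      -- no break: base_min stayed len(part[0])+1, the guard 'base_min < len(part[0])+1' fails
      (0, r_max)
  | some (s, base_min) =>
      -- the break fired (so the guard holds) and the while loop runs from row_index = s;
      -- pre_row starts None and is never reassigned, so the state's second component stays
      -- none and the mutation branch never fires.
      let r_min := ((List.range' s (n - s)).foldl (fun (st : Int × Option (List Int)) ri =>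
          let row := part.getD ri []
          let row := match st.2 with
            | none => row
            | some pre => fillA_mutate pre row base_min
          (st.1 + fillA_rowSum row base_min, st.2)) ((0 : Int), (none : Option (List Int)))).1
      (r_min, r_max)

-- ===== PORT B =====
def fill_part_alt (part : List (List Int)) (left_mosts : List Int) : Int × Int :=
  -- for row, lm in zip(part, left_mosts): bm = max(bm, lm); r_max += bm - sum(row[:bm])
  let stMax := (part.zip left_mosts).foldl (fun (st : Int × Int) p =>
      let bm := max st.2 p.2
      (st.1 + (bm - (PySem.List.slice p.1 none (some bm)).sum), bm)) (0, 0)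
  let r_max := stMax.1
  let width : Int := ((part.getD 0 []).length : Int)   -- len(part[0])
  -- the loop-with-break locating the first usable row = find?
  let found := (List.range part.length).find? (fun i =>
      decide (left_mosts.getD i 0 ≠ 0 ∧ left_mosts.getD i 0 ≤ width))
  let r_min := match found with
    | none => (0 : Int)
    | some s =>
      let base_min := left_mosts.getD s 0
      -- for c in range(base_min): col = [row[c] for row in part[start:]]; r_min += len(col) - sum(col)
      (PySem.List.pyRange 0 base_min 1).foldl (fun acc c =>
        let col := (part.drop s).map (fun row => PySem.List.pyGetD row c 0)
        acc + ((col.length : Int) - col.sum)) 0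
  (r_min, r_max)

-- ===== PRECONDITION & SPEC =====
-- Exactly where the Python A returns: A raises IndexError on empty part, on left_mosts
-- shorter than part, and when a running prefix maximum of left_mosts exceeds a row's length.
def Pre_fill_part (part : List (List Int)) (left_mosts : List Int) : Prop :=
  part ≠ [] ∧ part.length ≤ left_mosts.length ∧
    ∀ i < part.length, ∀ j ≤ i, left_mosts.getD j 0 ≤ ((part.getD i []).length : Int)
instance (part : List (List Int)) (left_mosts : List Int) : Decidable (Pre_fill_part part left_mosts) := by unfold Pre_fill_part; infer_instance
def pvWitness_fill_part : List (List Int) × List Int := ([[0, 1], [1, 0]], [1, 2])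

def Spec_fill_part (part : List (List Int)) (left_mosts : List Int) (out : Int × Int) : Prop := out = fill_part_alt part left_mosts
instance (part : List (List Int)) (left_mosts : List Int) (out : Int × Int) : Decidable (Spec_fill_part part left_mosts out) := by unfold Spec_fill_part; infer_instance

-- ===== CLAIM (what is proved, stated in full; the proofs are below) =====
def Claim_equal_fill_part : Prop := ∀ (part : List (List Int)) (left_mosts : List Int), Dom_fill_part part left_mosts → Pre_fill_part part left_mosts → Spec_fill_part part left_mosts (fill_part part left_mosts)

-- ===== LEMMAS AND PROOFS =====

lemma pv_sum_one_sub (xs : List Int) : (xs.map (fun x => 1 - x)).sum = (xs.length : Int) - xs.sum := by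
  induction xs with
  | nil => simp
  | cons h t ih => simp [ih]; ring

lemma pv_sum_getD_range (row : List Int) (k : Nat) :
    ((List.range k).map (fun i => row.getD i 0)).sum = (row.take k).sum := by
  induction k with
  | zero => simp
  | succ k ih =>
    rw [List.range_succ]
    simp only [List.map_append, List.sum_append, List.map_cons, List.map_nil,
      List.sum_cons, List.sum_nil, ih]
    rw [List.take_add_one, List.sum_append]
    congr 1
    by_cases h : k < row.length
    · simp [List.getD_eq_getElem?_getD, List.getElem?_eq_getElem h]
    · have hle : row.length ≤ k := by omega
      simp [List.getD_eq_getElem?_getD, List.getElem?_eq_none_iff.mpr hle]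

-- A's inner counting loop, in B's closed form (bound runs over nonnegative values only)
lemma pv_inner_row (row : List Int) (b a : Int) (hb : 0 ≤ b) :
    (PySem.List.pyRange 0 b 1).foldl (fun s c => s + (1 - PySem.List.pyGetD row c 0)) a
      = a + (b - (PySem.List.slice row none (some b)).sum) := by
  rw [PySem.List.foldl_add, PySem.List.pyRange_one, PySem.List.slice_to row hb]
  simp only [sub_zero, List.map_map]
  have h2 : ((fun c => 1 - PySem.List.pyGetD row c 0) ∘ fun (k : Nat) => (0 : Int) + (k : Int))
      = (fun x => 1 - x) ∘ (fun (k : Nat) => row.getD k 0) := by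
    funext k; simp [Function.comp, PySem.List.pyGetD_natCast]
  rw [h2, ← List.map_map, pv_sum_one_sub, List.length_map, List.length_range,
    pv_sum_getD_range, Int.toNat_of_nonneg hb]

-- the max phase: A's index loop with inner counting = B's zip loop with the closed form
lemma pv_max_eq : ∀ (part : List (List Int)) (lm : List Int) (r bm : Int),
    part.length ≤ lm.length → 0 ≤ bm →
    (List.range part.length).foldl (fun (st : Int × Int) i =>
        (st.1 + fillA_rowSum (part.getD i []) (max st.2 (lm.getD i 0)),
         max st.2 (lm.getD i 0))) (r, bm)
  = (part.zip lm).foldl (fun (st : Int × Int) p =>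
        (st.1 + (max st.2 p.2 - (PySem.List.slice p.1 none (some (max st.2 p.2))).sum),
         max st.2 p.2)) (r, bm) := by
  intro part
  induction part with
  | nil => intro lm r bm _ _; rfl
  | cons row part ih =>
    intro lm r bm hlen hbm
    cases lm with
    | nil => simp at hlen
    | cons v lm =>
      simp only [List.length_cons, List.range_succ_eq_map, List.foldl_cons, List.foldl_map,
        List.getD_cons_zero, Nat.succ_eq_add_one, List.getD_cons_succ, List.zip_cons_cons]
      rw [show fillA_rowSum row (max bm v) = max bm v - (PySem.List.slice row none (some (max bm v))).sum from by
            have h := pv_inner_row row (max bm v) 0 (le_trans hbm (le_max_left _ _))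
            simpa [fillA_rowSum] using h]
      exact ih lm _ _ (by simpa using hlen) (le_trans hbm (le_max_left _ _))

-- A's break-search loop = find? (and 'v < w + 1' is 'v ≤ w' on Int)
lemma pv_found_eq (lm : List Int) (w : Int) : ∀ (l : List Nat),
    l.foldl (fun (acc : Option (Nat × Int)) i =>
      match acc with
      | some r => some r
      | none =>
        if lm.getD i 0 ≠ 0 ∧ lm.getD i 0 < w + 1
        then some (i, lm.getD i 0) else none) none
  = (l.find? (fun i => decide (lm.getD i 0 ≠ 0 ∧ lm.getD i 0 ≤ w))).map
      (fun i => (i, lm.getD i 0)) := by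
  have aux : ∀ (l : List Nat) (r : Nat × Int),
      l.foldl (fun (acc : Option (Nat × Int)) i =>
        match acc with
        | some r' => some r'
        | none =>
          if lm.getD i 0 ≠ 0 ∧ lm.getD i 0 < w + 1
          then some (i, lm.getD i 0) else none) (some r) = some r := by
    intro l
    induction l with
    | nil => intro r; rfl
    | cons x t ih => intro r; exact ih r
  intro l
  induction l with
  | nil => rfl
  | cons x t ih =>
    rw [List.foldl_cons]
    by_cases h : lm.getD x 0 ≠ 0 ∧ lm.getD x 0 ≤ w
    · have h' : lm.getD x 0 ≠ 0 ∧ lm.getD x 0 < w + 1 := ⟨h.1, by omega⟩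
      rw [List.find?_cons_of_pos (by simpa using h)]
      dsimp only
      rw [if_pos h']
      rw [aux t (x, lm.getD x 0)]
      rfl
    · have h' : ¬(lm.getD x 0 ≠ 0 ∧ lm.getD x 0 < w + 1) := by
        intro hc; exact h ⟨hc.1, by omega⟩
      rw [List.find?_cons_of_neg (by simpa using h)]
      dsimp only
      rw [if_neg h']
      exact ih

-- A's while loop: pre_row stays none, so it is a plain sum of inner row sums
lemma pv_minA (part : List (List Int)) (bm : Int) : ∀ (l : List Nat) (a : Int),
    (l.foldl (fun (st : Int × Option (List Int)) ri =>
        (st.1 + fillA_rowSum (match st.2 with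
            | none => part.getD ri []
            | some pre => fillA_mutate pre (part.getD ri []) bm) bm, st.2))
      ((a : Int), (none : Option (List Int)))).1
  = a + (l.map (fun ri => fillA_rowSum (part.getD ri []) bm)).sum := by
  intro l
  induction l with
  | nil => intro a; simp
  | cons ri t ih =>
    intro a
    rw [List.foldl_cons]
    dsimp only
    rw [ih (a + fillA_rowSum (part.getD ri []) bm)]
    simp only [List.map_cons, List.sum_cons]
    ring

-- the index list range' s (n-s) mapped through getD is the suffix part[s:]
lemma pv_map_range' {α γ : Type} (d : α) (F : α → γ) (xs : List α) : ∀ (k s : Nat),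
    s + k = xs.length →
    (List.range' s k).map (fun i => F (xs.getD i d)) = (xs.drop s).map F := by
  intro k
  induction k with
  | zero =>
    intro s h
    rw [List.drop_of_length_le (by omega)]
    rfl
  | succ k ih =>
    intro s h
    have hs : s < xs.length := by omega
    rw [List.range'_succ, List.map_cons, ih (s + 1) (by omega),
      List.drop_eq_getElem_cons hs, List.map_cons, List.getD_eq_getElem _ _ hs]

-- summing row-major equals summing column-major
lemma pv_sum_swap {α β : Type} (f : α → β → Int) : ∀ (rs : List α) (cs : List β),
    (rs.map (fun r => (cs.map (f r)).sum)).sum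
      = (cs.map (fun c => (rs.map (fun r => f r c)).sum)).sum := by
  intro rs
  induction rs with
  | nil => intro cs; simp
  | cons r rs ih =>
    intro cs
    simp only [List.map_cons, List.sum_cons, ih, PySem.List.sum_map_add_int]

-- the min phase: A's row-major sum from row s = B's column-major loop
lemma pv_min_phase (part : List (List Int)) (s : Nat) (bm : Int) (hs : s ≤ part.length) :
    ((List.range' s (part.length - s)).map (fun ri => fillA_rowSum (part.getD ri []) bm)).sum
  = (PySem.List.pyRange 0 bm 1).foldl (fun acc c =>
      acc + ((((part.drop s).map (fun row => PySem.List.pyGetD row c 0)).length : Int)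
             - ((part.drop s).map (fun row => PySem.List.pyGetD row c 0)).sum)) 0 := by
  rw [PySem.List.foldl_add, zero_add]
  rw [pv_map_range' ([] : List Int) (fun row => fillA_rowSum row bm) part
        (part.length - s) s (by omega)]
  have hR : ∀ row : List Int, fillA_rowSum row bm
      = ((PySem.List.pyRange 0 bm 1).map (fun c => 1 - PySem.List.pyGetD row c 0)).sum := by
    intro row
    rw [fillA_rowSum, PySem.List.foldl_add, zero_add]
  have hC : ∀ c : Int,
      (((part.drop s).map (fun row => PySem.List.pyGetD row c 0)).length : Int)
        - ((part.drop s).map (fun row => PySem.List.pyGetD row c 0)).sum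
      = ((part.drop s).map (fun row => 1 - PySem.List.pyGetD row c 0)).sum := by
    intro c
    rw [← pv_sum_one_sub, List.map_map]
    simp only [Function.comp_def]
  simp only [hR, hC]
  exact pv_sum_swap (fun row c => 1 - PySem.List.pyGetD row c 0) (part.drop s)
    (PySem.List.pyRange 0 bm 1)

-- ===== VERDICT (by name: the statement is the Claim_ definition above) =====
theorem fill_part_spec : Claim_equal_fill_part := by
  intro part lm _dom hpre
  obtain ⟨-, hlen, -⟩ := hpre
  show fill_part part lm = fill_part_alt part lm
  dsimp only [fill_part, fill_part_alt]
  rw [pv_max_eq part lm 0 0 hlen le_rfl]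
  rw [pv_found_eq lm ((part.getD 0 []).length : Int) (List.range part.length)]
  cases hf : (List.range part.length).find?
      (fun i => decide (lm.getD i 0 ≠ 0 ∧ lm.getD i 0 ≤ ((part.getD 0 []).length : Int))) with
  | none => rfl
  | some s =>
    have hs : s < part.length := List.mem_range.mp (List.mem_of_find?_eq_some hf)
    dsimp only [Option.map_some]
    rw [pv_minA part (lm.getD s 0) (List.range' s (part.length - s)) 0, zero_add,
      pv_min_phase part s (lm.getD s 0) (le_of_lt hs)]
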